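-- pv_equiv track=rewrite | github.com/dfmop6/X12-Cracker | main.py | clean_string_format
-- ===== SOURCE A (Python) =====
-- def clean_string_format(input_string):
--     result, tt = [], []
--     vv = input_string.split(" ")
--     for r in vv:
--         result = []
--         for i, letter in enumerate(r):
--             if i % 2 == 1:
--                 continue
--             result.append(letter)
--         tt.append(''.join(result))
--
--     return ' '.join(tt)
-- ===== SOURCE B (Python) =====
-- def clean_string_format(input_string):
--     out = []
--     k = 0
--     for ch in input_string:
--         if ch == ' ':
--             out.append(ch)
--             k = 0
--         else:
--             if k % 2 == 0:
--                 out.append(ch)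
--             k += 1
--     return ''.join(out)
-- ===== Notes on version B (the rewrite author's own statement) =====
-- stated objective: simpler
-- what changed: B does a single character scan with a per-word position counter reset on spaces, instead of splitting into a word list, filtering each word by enumerated index, and rejoining.
import Mathlib
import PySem

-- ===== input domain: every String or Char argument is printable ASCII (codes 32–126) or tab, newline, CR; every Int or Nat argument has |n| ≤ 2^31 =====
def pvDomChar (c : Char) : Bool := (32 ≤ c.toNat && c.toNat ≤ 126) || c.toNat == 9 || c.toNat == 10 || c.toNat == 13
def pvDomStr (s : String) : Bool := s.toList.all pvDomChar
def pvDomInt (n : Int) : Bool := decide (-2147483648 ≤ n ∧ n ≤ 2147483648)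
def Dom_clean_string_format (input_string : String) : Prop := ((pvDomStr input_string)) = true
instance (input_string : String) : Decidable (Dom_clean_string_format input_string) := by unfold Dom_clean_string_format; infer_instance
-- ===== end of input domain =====

-- B replaces split/filter-per-word/join by one scan with a per-word counter; objective: simpler (same O(n) cost).

-- ===== PORT A =====
-- inner loop: for i, letter in enumerate(r): if i % 2 == 1: continue; result.append(letter)
def pvInner (r : List Char) : List Char :=
  (PySem.List.enumerate r).foldl
    (fun result p => if PySem.Int.mod p.1 2 == 1 then result else result ++ [p.2]) []

def clean_string_format (input_string : String) : String :=
  let vv := PySem.Chars.splitOn input_string.toList [' ']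
  let tt := vv.foldl (fun tt r => tt ++ [pvInner r]) []
  String.ofList (PySem.Chars.join [' '] tt)

-- ===== PORT B =====
-- the loop state is (out, k); k : Int as in Python
def clean_string_format_alt (input_string : String) : String :=
  String.ofList
    ((input_string.toList.foldl
        (fun st ch =>
          if ch = ' ' then (st.1 ++ [ch], (0 : Int))
          else (if PySem.Int.mod st.2 2 == 0 then st.1 ++ [ch] else st.1, st.2 + 1))
        ([], (0 : Int))).1)

-- ===== PRECONDITION & SPEC =====
def Spec_clean_string_format (input_string : String) (out : String) : Prop := out = clean_string_format_alt input_string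
instance (input_string : String) (out : String) : Decidable (Spec_clean_string_format input_string out) := by unfold Spec_clean_string_format; infer_instance

-- ===== CLAIM (what is proved, stated in full; the proofs are below) =====
def Claim_equal_clean_string_format : Prop := ∀ (input_string : String), Dom_clean_string_format input_string → Spec_clean_string_format input_string (clean_string_format input_string)

-- ===== LEMMAS AND PROOFS =====

-- even-index filter of a word whose indices start at k
def pvEvensK : Int → List Char → List Char
  | _, [] => []
  | k, c :: t => if PySem.Int.mod k 2 == 1 then pvEvensK (k + 1) t else c :: pvEvensK (k + 1) t

-- split on a single space, Python split(" ") semantics (empty pieces kept)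
def pvSpl : List Char → List (List Char)
  | [] => [[]]
  | c :: t =>
    if c = ' ' then [] :: pvSpl t
    else match pvSpl t with
      | [] => [[c]]
      | w :: ws => (c :: w) :: ws

-- B's scan, output component
def pvBgo : Int → List Char → List Char
  | _, [] => []
  | k, c :: t =>
    if c = ' ' then c :: pvBgo 0 t
    else if PySem.Int.mod k 2 == 0 then c :: pvBgo (k + 1) t else pvBgo (k + 1) t

-- B's scan, counter component
def pvKend : Int → List Char → Int
  | k, [] => k
  | k, c :: t => if c = ' ' then pvKend 0 t else pvKend (k + 1) t

-- ' '-joined even-filters of the tail words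
def pvJoinR : List (List Char) → List Char
  | [] => []
  | w :: ws => ' ' :: (pvEvensK 0 w ++ pvJoinR ws)

theorem pvMod2_cases (k : Int) : PySem.Int.mod k 2 = 0 ∨ PySem.Int.mod k 2 = 1 := by
  have h1 := PySem.Int.mod_nonneg k (b := 2) (by norm_num)
  have h2 := PySem.Int.mod_lt k (b := 2) (by norm_num)
  omega

theorem pvInner_eq (r : List Char) :
    ∀ (acc : List Char) (k : Int),
      (PySem.List.enumerate r k).foldl
          (fun result p => if PySem.Int.mod p.1 2 == 1 then result else result ++ [p.2]) acc
        = acc ++ pvEvensK k r := by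
  induction r with
  | nil => intro acc k; simp [PySem.List.enumerate_nil, pvEvensK]
  | cons c t ih =>
    intro acc k
    rw [PySem.List.enumerate_cons, List.foldl_cons]
    rcases pvMod2_cases k with hm | hm
    · rw [if_neg (by rw [hm]; decide), ih,
        show pvEvensK k (c :: t) = c :: pvEvensK (k + 1) t by
          rw [pvEvensK, if_neg (by rw [hm]; decide)]]
      simp
    · rw [if_pos (by rw [hm]; decide), ih,
        show pvEvensK k (c :: t) = pvEvensK (k + 1) t by
          rw [pvEvensK, if_pos (by rw [hm]; decide)]]

theorem pvSpl_ne_nil (s : List Char) : pvSpl s ≠ [] := by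
  cases s with
  | nil => simp [pvSpl]
  | cons c t =>
    simp only [pvSpl]
    split_ifs
    · simp
    · cases h : pvSpl t <;> simp

theorem pvSplitOn_go_eq (s : List Char) :
    ∀ (fuel : Nat) (cur : List Char) (acc : List (List Char)), s.length < fuel →
      PySem.Chars.splitOn.go [' '] fuel s cur acc
        = acc.reverse ++
            (match pvSpl s with
              | [] => [cur.reverse]
              | w :: ws => (cur.reverse ++ w) :: ws) := by
  induction s with
  | nil =>
    intro fuel cur acc hf
    cases fuel with
    | zero => omega
    | succ n =>
      rw [PySem.Chars.splitOn.go]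
      · simp [pvSpl]
      · omega
  | cons c t ih =>
    intro fuel cur acc hf
    cases fuel with
    | zero => simp at hf
    | succ n =>
      rw [PySem.Chars.splitOn.go]
      by_cases hc : c = ' '
      · have hpre : [' '].isPrefixOf (c :: t) = true := by
          subst hc; simp [List.isPrefixOf]
        simp only [hpre, if_pos]
        have ht : t.length < n := by simp at hf; omega
        rw [show List.drop [' '].length (c :: t) = t by simp]
        rw [ih n [] (cur.reverse :: acc) ht]
        rcases h : pvSpl t with _ | ⟨w, ws⟩
        · exact absurd h (pvSpl_ne_nil t)
        · simp [pvSpl, hc, h]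
      · have hpre : [' '].isPrefixOf (c :: t) = false := by
          simp [List.isPrefixOf]
          intro h; exact absurd h.symm hc
        simp only [hpre, Bool.false_eq_true, if_false]
        have ht : t.length < n := by simp at hf; omega
        rw [ih n (c :: cur) acc ht]
        rcases h : pvSpl t with _ | ⟨w, ws⟩
        · exact absurd h (pvSpl_ne_nil t)
        · simp [pvSpl, hc, h]

theorem pvSplitOn_eq (s : List Char) : PySem.Chars.splitOn s [' '] = pvSpl s := by
  rw [PySem.Chars.splitOn]
  rw [pvSplitOn_go_eq s (s.length + 1) [] [] (by omega)]
  rcases h : pvSpl s with _ | ⟨w, ws⟩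
  · exact absurd h (pvSpl_ne_nil s)
  · simp

theorem pvBfold_eq (l : List Char) :
    ∀ (out : List Char) (k : Int),
      l.foldl
          (fun st ch =>
            if ch = ' ' then (st.1 ++ [ch], (0 : Int))
            else (if PySem.Int.mod st.2 2 == 0 then st.1 ++ [ch] else st.1, st.2 + 1))
          (out, k)
        = (out ++ pvBgo k l, pvKend k l) := by
  induction l with
  | nil => intro out k; simp [pvBgo, pvKend]
  | cons c t ih =>
    intro out k
    simp only [List.foldl_cons]
    by_cases hc : c = ' '
    · rw [if_pos hc, ih,
        show pvBgo k (c :: t) = c :: pvBgo 0 t by rw [pvBgo, if_pos hc],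
        show pvKend k (c :: t) = pvKend 0 t by rw [pvKend, if_pos hc]]
      subst hc; simp
    · rcases pvMod2_cases k with h | h
      · rw [if_neg hc, if_pos (by rw [h]; decide), ih,
          show pvBgo k (c :: t) = c :: pvBgo (k + 1) t by
            rw [pvBgo, if_neg hc, if_pos (by rw [h]; decide)],
          show pvKend k (c :: t) = pvKend (k + 1) t by rw [pvKend, if_neg hc]]
        simp
      · rw [if_neg hc, if_neg (by rw [h]; decide), ih,
          show pvBgo k (c :: t) = pvBgo (k + 1) t by
            rw [pvBgo, if_neg hc, if_neg (by rw [h]; decide)],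
          show pvKend k (c :: t) = pvKend (k + 1) t by rw [pvKend, if_neg hc]]

theorem pvJoin_map_eq (w : List Char) (ws : List (List Char)) :
    PySem.Chars.join [' '] ((w :: ws).map (pvEvensK 0)) = pvEvensK 0 w ++ pvJoinR ws := by
  induction ws generalizing w with
  | nil => simp [pvJoinR, PySem.Chars.join_singleton]
  | cons w' ws' ih =>
    simp only [List.map_cons] at *
    rw [PySem.Chars.join_cons_cons, pvJoinR, ih w']
    simp

theorem pvMain (s : List Char) :
    ∀ (k : Int),
      (match pvSpl s with
        | [] => []
        | w :: ws => pvEvensK k w ++ pvJoinR ws)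
        = pvBgo k s := by
  induction s with
  | nil => intro k; simp [pvSpl, pvEvensK, pvJoinR, pvBgo]
  | cons c t ih =>
    intro k
    by_cases hc : c = ' '
    · rcases h : pvSpl t with _ | ⟨w, ws⟩
      · exact absurd h (pvSpl_ne_nil t)
      · have := ih 0
        rw [h] at this
        simp [pvSpl, hc, h, pvEvensK, pvJoinR, pvBgo, this]
    · rcases h : pvSpl t with _ | ⟨w, ws⟩
      · exact absurd h (pvSpl_ne_nil t)
      · have := ih (k + 1)
        rw [h] at this
        have this' : pvEvensK (k + 1) w ++ pvJoinR ws = pvBgo (k + 1) t := this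
        rw [show pvSpl (c :: t) = (c :: w) :: ws by rw [pvSpl, if_neg hc, h]]
        show pvEvensK k (c :: w) ++ pvJoinR ws = pvBgo k (c :: t)
        rcases pvMod2_cases k with hm | hm
        · rw [show pvEvensK k (c :: w) = c :: pvEvensK (k + 1) w by
              rw [pvEvensK, if_neg (by rw [hm]; decide)],
            show pvBgo k (c :: t) = c :: pvBgo (k + 1) t by
              rw [pvBgo, if_neg hc, if_pos (by rw [hm]; decide)]]
          simp [this']
        · rw [show pvEvensK k (c :: w) = pvEvensK (k + 1) w by
              rw [pvEvensK, if_pos (by rw [hm]; decide)],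
            show pvBgo k (c :: t) = pvBgo (k + 1) t by
              rw [pvBgo, if_neg hc, if_neg (by rw [hm]; decide)]]
          exact this' 

-- ===== VERDICT (by name: the statement is the Claim_ definition above) =====
theorem clean_string_format_spec : Claim_equal_clean_string_format := by
  intro s _
  unfold Spec_clean_string_format clean_string_format clean_string_format_alt
  rw [pvBfold_eq s.toList [] 0]
  simp only []
  rw [PySem.List.foldl_append_singleton_eq_map, List.nil_append, pvSplitOn_eq]
  have hin : ∀ r : List Char, pvInner r = pvEvensK 0 r := by
    intro r
    unfold pvInner
    rw [pvInner_eq r [] 0]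
    simp
  rw [show (pvSpl s.toList).map pvInner = (pvSpl s.toList).map (pvEvensK 0) from
    List.map_congr_left (fun r _ => hin r)]
  rcases h : pvSpl s.toList with _ | ⟨w, ws⟩
  · exact absurd h (pvSpl_ne_nil s.toList)
  · rw [pvJoin_map_eq w ws]
    have this' : pvEvensK 0 w ++ pvJoinR ws = pvBgo 0 s.toList := by
      have := pvMain s.toList 0
      rw [h] at this
      exact this
    rw [this']
    simp
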